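-- pv_equiv track=rewrite | github.com/altCourier/COM1001-BLM1001 | 2021-Lab/lab7/lab7.py | puanlama
-- ===== SOURCE A (Python) =====
-- def puanlama(gamer1,gamer2):
--     liste=[0,0]
--     for i in range(len(gamer1)):
--         x=ord(gamer1[i])-ord(gamer2[i])
--         if x>0:
--             liste[0]+=x
--         else:
--             liste[1]+=abs(x)
--     return liste
-- ===== SOURCE B (Python) =====
-- def puanlama(gamer1, gamer2):
--     # One branch-free pass computes s = sum of diffs and t = sum of |diffs|;
--     # the two buckets are recovered from the identity pos=(t+s)/2, neg=(t-s)/2.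
--     s = 0
--     t = 0
--     for a, b in zip(gamer1, gamer2):
--         d = ord(a) - ord(b)
--         s += d
--         t += abs(d)
--     return [(t + s) // 2, (t - s) // 2]
-- ===== Notes on version B (the rewrite author's own statement) =====
-- stated objective: alternative
-- what changed: Instead of classifying each difference into a positive/negative bucket with a branch, B accumulates only the plain sum s and the absolute sum t of the char-code differences in one branch-free pass and recovers the two totals from the identity pos=(t+s)/2, neg=(t-s)/2.
import Mathlib
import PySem

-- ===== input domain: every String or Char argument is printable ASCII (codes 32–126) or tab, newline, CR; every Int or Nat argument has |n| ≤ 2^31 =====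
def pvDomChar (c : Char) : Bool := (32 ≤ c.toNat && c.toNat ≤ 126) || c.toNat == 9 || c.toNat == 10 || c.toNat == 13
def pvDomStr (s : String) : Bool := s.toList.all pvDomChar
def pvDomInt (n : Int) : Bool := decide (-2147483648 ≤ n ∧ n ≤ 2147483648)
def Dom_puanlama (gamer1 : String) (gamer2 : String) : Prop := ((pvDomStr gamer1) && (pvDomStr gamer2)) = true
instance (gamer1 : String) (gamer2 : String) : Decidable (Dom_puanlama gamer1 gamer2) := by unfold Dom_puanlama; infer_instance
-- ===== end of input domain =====

-- B drops A's branch-and-buckets loop: one branch-free pass accumulates the plain sum s and absolute sum t of the char-code differences, and the buckets are recovered by pos=(t+s)//2, neg=(t-s)//2; equivalence proved for len(gamer1) ≤ len(gamer2) (A raises IndexError otherwise).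


-- ===== PORT A =====
def puanlama (gamer1 : String) (gamer2 : String) : List Int :=
  (PySem.List.pyRange 0 (gamer1.toList.length : Int) 1).foldl
    (fun liste i =>
      let x : Int := ((PySem.List.pyGetD gamer1.toList i ' ').toNat : Int)
                   - ((PySem.List.pyGetD gamer2.toList i ' ').toNat : Int)
      if x > 0 then [PySem.List.pyGetD liste 0 0 + x, PySem.List.pyGetD liste 1 0]
      else [PySem.List.pyGetD liste 0 0, PySem.List.pyGetD liste 1 0 + |x|])
    [0, 0]

-- ===== PORT B =====
def puanlama_alt (gamer1 : String) (gamer2 : String) : List Int :=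
  let st := (gamer1.toList.zip gamer2.toList).foldl
    (fun (p : Int × Int) q =>
      let d : Int := ((q.1.toNat : Int) - (q.2.toNat : Int))
      (p.1 + d, p.2 + |d|))
    (0, 0)
  [PySem.Int.floordiv (st.2 + st.1) 2, PySem.Int.floordiv (st.2 - st.1) 2]

-- ===== PRECONDITION & SPEC =====
-- A indexes gamer2 at every index of gamer1, so it raises IndexError when gamer1 is longer.
def Pre_puanlama (gamer1 : String) (gamer2 : String) : Prop :=
  gamer1.toList.length ≤ gamer2.toList.length
instance (gamer1 : String) (gamer2 : String) : Decidable (Pre_puanlama gamer1 gamer2) := by unfold Pre_puanlama; infer_instance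
def pvWitness_puanlama : String × String := ("ab", "ba")

def Spec_puanlama (gamer1 : String) (gamer2 : String) (out : List Int) : Prop := out = puanlama_alt gamer1 gamer2
instance (gamer1 : String) (gamer2 : String) (out : List Int) : Decidable (Spec_puanlama gamer1 gamer2 out) := by unfold Spec_puanlama; infer_instance

-- ===== CLAIM (what is proved, stated in full; the proofs are below) =====
def Claim_equal_puanlama : Prop := ∀ (gamer1 : String) (gamer2 : String), Dom_puanlama gamer1 gamer2 → Pre_puanlama gamer1 gamer2 → Spec_puanlama gamer1 gamer2 (puanlama gamer1 gamer2)

-- ===== LEMMAS AND PROOFS =====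

-- B's fold from any state (s, t): running sum and running absolute sum of the diffs
theorem loopB_eq (L : List (Char × Char)) (s t : Int) :
    (L.foldl (fun (p : Int × Int) q =>
        (p.1 + (((q.1.toNat : Int) - (q.2.toNat : Int))), p.2 + |((q.1.toNat : Int) - (q.2.toNat : Int))|)) (s, t))
    = (s + (L.map (fun p => ((p.1.toNat : Int) - (p.2.toNat : Int)))).sum,
       t + ((L.map (fun p => ((p.1.toNat : Int) - (p.2.toNat : Int)))).map (|·|)).sum) := by
  induction L generalizing s t with
  | nil => simp
  | cons q tl ih => simp [ih]; constructor <;> ring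

-- A's loop, over Nat indices, from an arbitrary state [a, b]
theorem loopA_eq (l1 : List Char) (l2 : List Char) (a b : Int)
    (h : l1.length ≤ l2.length) :
    (List.range l1.length).foldl
      (fun liste k =>
        let x : Int := ((l1.getD k ' ').toNat : Int) - ((l2.getD k ' ').toNat : Int)
        if x > 0 then [PySem.List.pyGetD liste 0 0 + x, PySem.List.pyGetD liste 1 0]
        else [PySem.List.pyGetD liste 0 0, PySem.List.pyGetD liste 1 0 + |x|])
      [a, b]
    = [a + (((l1.zip l2).map (fun p => ((p.1.toNat : Int) - (p.2.toNat : Int)))).map (fun d => max d 0)).sum,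
       b - (((l1.zip l2).map (fun p => ((p.1.toNat : Int) - (p.2.toNat : Int)))).map (fun d => min d 0)).sum] := by
  induction l1 generalizing l2 a b with
  | nil => simp
  | cons c1 t1 ih =>
    cases l2 with
    | nil => simp at h
    | cons c2 t2 =>
      have h' : t1.length ≤ t2.length := by simpa using h
      rw [List.length_cons, List.range_succ_eq_map, List.foldl_cons, List.foldl_map]
      simp only [List.getD_cons_zero, List.getD_cons_succ]
      by_cases hx : ((c1.toNat : Int) - (c2.toNat : Int)) > 0
      · rw [if_pos hx]
        have e0 : PySem.List.pyGetD ([a, b] : List Int) 0 0 = a := rfl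
        have e1 : PySem.List.pyGetD ([a, b] : List Int) 1 0 = b := rfl
        rw [e0, e1, ih t2 _ _ h']
        simp [max_eq_left (le_of_lt hx), min_eq_right (le_of_lt hx)]
        ring
      · rw [if_neg hx]
        have e0 : PySem.List.pyGetD ([a, b] : List Int) 0 0 = a := rfl
        have e1 : PySem.List.pyGetD ([a, b] : List Int) 1 0 = b := rfl
        rw [e0, e1, ih t2 _ _ h']
        push Not at hx
        simp [max_eq_right hx, min_eq_left hx, abs_of_nonpos (by omega : (c1.toNat : Int) - (c2.toNat : Int) ≤ 0)]
        ring

-- the recombination identities: 2·Σ max(d,0) = Σ|d| + Σd and -2·Σ min(d,0) = Σ|d| - Σd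
theorem sum_max_min (L : List Int) :
    2 * (L.map (fun d => max d 0)).sum = (L.map (|·|)).sum + L.sum ∧
    -(2 * (L.map (fun d => min d 0)).sum) = (L.map (|·|)).sum - L.sum := by
  induction L with
  | nil => simp
  | cons d t ih =>
    simp only [List.map_cons, List.sum_cons]
    rcases ih with ⟨h1, h2⟩
    constructor
    · rcases le_or_gt d 0 with hd | hd
      · rw [max_eq_right hd, abs_of_nonpos hd]; omega
      · rw [max_eq_left (le_of_lt hd), abs_of_pos hd]; omega
    · rcases le_or_gt d 0 with hd | hd
      · rw [min_eq_left hd, abs_of_nonpos hd]; omega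
      · rw [min_eq_right (le_of_lt hd), abs_of_pos hd]; omega

theorem fdiv_two_mul (x : Int) : PySem.Int.floordiv (2 * x) 2 = x := by
  rw [PySem.Int.floordiv_eq_ediv_of_pos (by norm_num)]
  omega

-- ===== VERDICT (by name: the statement is the Claim_ definition above) =====
theorem puanlama_spec : Claim_equal_puanlama := by
  intro g1 g2 _ hpre
  unfold Spec_puanlama puanlama puanlama_alt
  rw [PySem.List.pyRange_zero_nat, List.foldl_map]
  simp only [PySem.List.pyGetD_natCast]
  rw [loopA_eq g1.toList g2.toList 0 0 hpre]
  set L := (g1.toList.zip g2.toList).map (fun p => ((p.1.toNat : Int) - (p.2.toNat : Int))) with hL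
  have hfold : ((g1.toList.zip g2.toList).foldl
      (fun (p : Int × Int) q =>
        (p.1 + (((q.1.toNat : Int) - (q.2.toNat : Int))), p.2 + |((q.1.toNat : Int) - (q.2.toNat : Int))|))
      (0, 0)) = (0 + L.sum, 0 + (L.map (|·|)).sum) := by
    rw [hL]; exact loopB_eq _ 0 0
  simp only [hfold]
  rcases sum_max_min L with ⟨h1, h2⟩
  have e1 : (0 : Int) + (L.map (|·|)).sum + (0 + L.sum) = 2 * ((L.map (fun d => max d 0)).sum) := by omega
  have e2 : (0 : Int) + (L.map (|·|)).sum - (0 + L.sum) = 2 * (-((L.map (fun d => min d 0)).sum)) := by omega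
  rw [e1, e2, fdiv_two_mul, fdiv_two_mul]
  simp
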